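-- pv_equiv track=rewrite | github.com/hkassow/leet_solutions | alternativeProblems.py | solve
-- ===== SOURCE A (Python) =====
-- def solve(field, figure):
--     def canFall(row, col):
--         figurePoints = [[0,0], [1,0], [2,0], [1,1], [1,2], [2,2], [2,1], [0,2], [0,1]]
--         if (row == len(field)):
--             return False
--         for [x,y] in figurePoints:
--             if figure[2-x][y] == 1:
--                 i,j = row-x, y+col
--                 if i < 0:
--                     continue
--                 if field[i][j] == 1:
--                     return False
--         return True
--     def isFilled(bottom, figurePos):
--         for i in range(3):
--             row = bottom - i
--             if row < 0:
--                 return False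
--             filled = True
--             for j in range(len(field[0])):
--                 col = j
--
--                 if field[row][j] == 0 and ( j-figurePos < 0 or 3 <= j-figurePos or figure[2-i][j-figurePos] == 0):
--                     filled = False
--                     break
--             if filled:
--                 return True
--
--     for j in range(len(field[0])- 2):
--         i = 0
--
--         while canFall(i+1, j):
--             i += 1
--         if isFilled(i, j):
--             return j
--     return -1
-- ===== SOURCE B (Python) =====
-- def solve(field, figure):
--     h, w = len(field), len(field[0])
--
--     def drop(c, lo):
--         # first filled row in column c at index >= lo, or h if none
--         return next((r for r in range(lo, h) if field[r][c] == 1), h)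
--
--     for j in range(w - 2):
--         # resting bottom row: tightest constraint over the occupied figure cells
--         i = h - 1
--         for x in range(3):
--             for y in range(3):
--                 if figure[2 - x][y] == 1:
--                     i = min(i, drop(j + y, max(0, 1 - x)) + x - 1)
--         # does any of the up-to-three occupied rows become complete?
--         for x in range(3):
--             r = i - x
--             if r < 0:
--                 break
--             if all(field[r][c] != 0 or (0 <= c - j < 3 and figure[2 - x][c - j] != 0)
--                    for c in range(w)):
--                 return j
--     return -1
-- ===== Notes on version B (the rewrite author's own statement) =====
-- stated objective: alternative
-- what changed: Replaces the step-by-step falling simulation (while canFall: i += 1, re-testing all nine figure cells at each depth) by a direct computation of the resting row as the minimum, over the figure's occupied cells, of first-filled-row-in-column arithmetic, then checks the up-to-three landed rows; Pre_ requires the shapes A's indexing generally needs (field rows at least as long as the first row, a 3x3-or-larger figure, when the width reaches 3), excluding rare malformed inputs on which A's lazy short-circuiting cell access still returns but B's whole-column/whole-figure scans raise.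
-- outside the precondition, e.g. on solve([[1, 1, 1], [1, 1]], [[1, 1, 1], [1, 1, 1], [1, 1, 1]]): A returns 0, B raises IndexError; on solve([[1, 1, 1], [1, 1, 1]], [[], [], [1]]): A returns 0, B raises IndexError
import Mathlib
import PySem

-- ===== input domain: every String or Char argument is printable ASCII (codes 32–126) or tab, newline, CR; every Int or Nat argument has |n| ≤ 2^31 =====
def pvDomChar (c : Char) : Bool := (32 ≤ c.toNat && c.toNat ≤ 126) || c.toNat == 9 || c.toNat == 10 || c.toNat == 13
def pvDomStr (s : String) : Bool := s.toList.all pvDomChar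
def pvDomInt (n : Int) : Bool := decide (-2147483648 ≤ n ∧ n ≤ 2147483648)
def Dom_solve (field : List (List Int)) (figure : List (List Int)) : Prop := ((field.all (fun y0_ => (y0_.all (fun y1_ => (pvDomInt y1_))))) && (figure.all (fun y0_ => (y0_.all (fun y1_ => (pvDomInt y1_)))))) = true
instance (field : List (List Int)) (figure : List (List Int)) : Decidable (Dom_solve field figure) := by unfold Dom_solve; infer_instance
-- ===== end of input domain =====

-- B computes the resting row directly from per-column first-filled-row scans instead of
-- simulating the fall step by step; same return value on Pre_, similar cost (alternative).

-- ===== PORT A =====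
-- grid cell access g[r][c]; inside Pre_ every access of either port has in-range nonnegative indices
def gget (g : List (List Int)) (r c : Int) : Int :=
  PySem.List.pyGetD (PySem.List.pyGetD g r []) c 0

-- figurePoints literal from A
def aPts : List (Int × Int) := [(0,0),(1,0),(2,0),(1,1),(1,2),(2,2),(2,1),(0,2),(0,1)]

def canFall (field figure : List (List Int)) (row col : Int) : Bool :=
  if row = (field.length : Int) then false
  else aPts.all (fun p =>
    if gget figure (2 - p.1) p.2 = 1 then
      if row - p.1 < 0 then true
      else !(decide (gget field (row - p.1) (p.2 + col) = 1))
    else true)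

-- inner 'for j in range(len(field[0]))' loop of isFilled with its break flag, as all
def isFilledRow (field figure : List (List Int)) (row figurePos i : Int) : Bool :=
  (PySem.List.pyRange 0 ((field.headD []).length : Int) 1).all (fun jj =>
    !((decide (gget field row jj = 0)) &&
      ((decide (jj - figurePos < 0)) || (decide (3 ≤ jj - figurePos)) ||
       (decide (gget figure (2 - i) (jj - figurePos) = 0)))))

def isFilledAux (field figure : List (List Int)) (bottom figurePos : Int) : List Int → Bool
  | [] => false
  | i :: rest =>
      if bottom - i < 0 then false
      else if isFilledRow field figure (bottom - i) figurePos i then true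
      else isFilledAux field figure bottom figurePos rest

def isFilled (field figure : List (List Int)) (bottom figurePos : Int) : Bool :=
  isFilledAux field figure bottom figurePos (PySem.List.pyRange 0 3 1)

-- the 'while canFall(i+1, j): i += 1' loop, fuel = len(field) (sufficient: canFall(len(field)) = false)
def fallAux (field figure : List (List Int)) (col : Int) : Nat → Int → Int
  | 0, i => i
  | fuel+1, i => if canFall field figure (i+1) col then fallAux field figure col fuel (i+1) else i

def solveAuxA (field figure : List (List Int)) : List Int → Int
  | [] => -1
  | j :: rest =>
      let i := fallAux field figure j field.length 0
      if isFilled field figure i j then j else solveAuxA field figure rest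

def solve (field : List (List Int)) (figure : List (List Int)) : Int :=
  solveAuxA field figure (PySem.List.pyRange 0 (((field.headD []).length : Int) - 2) 1)

-- ===== PORT B =====
-- first filled row of column c at index ≥ lo, or len(field) if none (next(…, h) in Source B)
def dropB (field : List (List Int)) (c lo : Int) : Int :=
  (((PySem.List.pyRange lo (field.length : Int) 1).find?
      (fun r => decide (gget field r c = 1))).getD ((field.length : Int)))

-- the x-major (x,y) iteration order of Source B's constraint loop
def bCells : List (Int × Int) := [(0,0),(0,1),(0,2),(1,0),(1,1),(1,2),(2,0),(2,1),(2,2)]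

-- resting bottom row: tightest constraint over the occupied figure cells
def restB (field figure : List (List Int)) (j : Int) : Int :=
  bCells.foldl (fun i p =>
    if gget figure (2 - p.1) p.2 = 1 then
      min i (dropB field (j + p.2) (max 0 (1 - p.1)) + p.1 - 1)
    else i) (((field.length : Int)) - 1)

def checkRowB (field figure : List (List Int)) (r j x : Int) : Bool :=
  (PySem.List.pyRange 0 ((field.headD []).length : Int) 1).all (fun c =>
    (decide (¬ gget field r c = 0)) ||
    ((decide (0 ≤ c - j)) && (decide (c - j < 3)) && (decide (¬ gget figure (2 - x) (c - j) = 0))))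

def checkB (field figure : List (List Int)) (i j : Int) : List Int → Bool
  | [] => false
  | x :: rest =>
      if i - x < 0 then false
      else if checkRowB field figure (i - x) j x then true
      else checkB field figure i j rest

def solveAuxB (field figure : List (List Int)) : List Int → Int
  | [] => -1
  | j :: rest =>
      let i := restB field figure j
      if checkB field figure i j (PySem.List.pyRange 0 3 1) then j
      else solveAuxB field figure rest

def solve_alt (field : List (List Int)) (figure : List (List Int)) : Int :=
  solveAuxB field figure (PySem.List.pyRange 0 (((field.headD []).length : Int) - 2) 1)

-- ===== PRECONDITION & SPEC =====
-- Pre_ excludes inputs where the Python raises (empty field; and, once the width reaches 3 so the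
-- column loop runs, field rows shorter than the first row or a figure without 3 rows of ≥ 3 cells);
-- this also excludes rare malformed shapes on which A's lazy short-circuiting access still returns
-- a value but B's whole-column/whole-figure scans raise (see claim cites).
def Pre_solve (field : List (List Int)) (figure : List (List Int)) : Prop :=
  field ≠ [] ∧
  (3 ≤ (field.headD []).length →
    (∀ r ∈ field, (field.headD []).length ≤ r.length) ∧
    3 ≤ figure.length ∧ (∀ r ∈ figure.take 3, 3 ≤ r.length))

instance (field : List (List Int)) (figure : List (List Int)) : Decidable (Pre_solve field figure) := by
  unfold Pre_solve; infer_instance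

def pvWitness_solve : List (List Int) × List (List Int) :=
  ([[0,0,0],[1,1,0]], [[1,0,0],[1,0,0],[1,1,1]])

def Spec_solve (field : List (List Int)) (figure : List (List Int)) (out : Int) : Prop := out = solve_alt field figure
instance (field : List (List Int)) (figure : List (List Int)) (out : Int) : Decidable (Spec_solve field figure out) := by unfold Spec_solve; infer_instance

-- ===== CLAIM (what is proved, stated in full; the proofs are below) =====
def Claim_equal_solve : Prop := ∀ (field : List (List Int)) (figure : List (List Int)), Dom_solve field figure → Pre_solve field figure → Spec_solve field figure (solve field figure)

-- ===== LEMMAS AND PROOFS =====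

theorem canFall_false_iff (field figure : List (List Int)) (row col : Int) :
    canFall field figure row col = false ↔
      row = (field.length : Int) ∨
      ∃ p ∈ aPts, gget figure (2 - p.1) p.2 = 1 ∧ 0 ≤ row - p.1 ∧
        gget field (row - p.1) (p.2 + col) = 1 := by
  unfold canFall
  split
  · simp_all
  · rename_i hrow
    rw [List.all_eq_false]
    constructor
    · rintro ⟨p, hp, hb⟩
      refine Or.inr ⟨p, hp, ?_⟩
      by_cases h1 : gget figure (2 - p.1) p.2 = 1 <;>
        by_cases h2 : row - p.1 < 0 <;> simp [h1, h2] at hb ⊢ <;> omega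
    · rintro (h | ⟨p, hp, h1, h2, h3⟩)
      · exact absurd h hrow
      · exact ⟨p, hp, by simp [h1, h3]; omega⟩

theorem fallAux_eq_least (field figure : List (List Int)) (col : Int) :
    ∀ (fuel : Nat) (i m : Int), i ≤ m → (m - i).toNat < fuel →
    (∀ k, i ≤ k → k < m → canFall field figure (k+1) col = true) →
    canFall field figure (m+1) col = false →
    fallAux field figure col fuel i = m := by
  intro fuel
  induction fuel with
  | zero => intro i m _ h2 _ _; omega
  | succ n ih =>
      intro i m h1 h2 h3 h4
      by_cases he : i = m
      · subst he; simp [fallAux, h4]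
      · have hlt : i < m := lt_of_le_of_ne h1 he
        have : canFall field figure (i+1) col = true := h3 i le_rfl hlt
        simp only [fallAux, this, if_true]
        exact ih (i+1) m (by omega) (by omega) (fun k hk1 hk2 => h3 k (by omega) hk2) h4

theorem dropB_all (field : List (List Int)) (c : Int) :
    ∀ (n : Nat) (lo : Int), ((field.length : Int) - lo).toNat = n → lo ≤ (field.length : Int) →
    (lo ≤ dropB field c lo ∧
     (dropB field c lo = (field.length : Int) ∨
      (dropB field c lo < (field.length : Int) ∧ gget field (dropB field c lo) c = 1)) ∧
     ∀ r, lo ≤ r → r < dropB field c lo → ¬ gget field r c = 1) := by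
  intro n
  induction n with
  | zero =>
      intro lo hn hle
      have : lo = (field.length : Int) := by omega
      subst this
      rw [dropB, PySem.List.pyRange_one_eq_nil le_rfl]
      simp
      omega
  | succ n ih =>
      intro lo hn hle
      have hlt : lo < (field.length : Int) := by omega
      have hcons := PySem.List.pyRange_one_cons hlt
      rw [dropB, hcons]
      by_cases hcell : gget field lo c = 1
      · rw [List.find?_cons_of_pos (p := fun r => decide (gget field r c = 1)) (by simp [hcell])]
        simp only [Option.getD_some]
        refine ⟨le_rfl, Or.inr ⟨hlt, hcell⟩, ?_⟩
        intro r h1 h2 _; omega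
      · rw [List.find?_cons_of_neg (p := fun r => decide (gget field r c = 1)) (by simp [hcell])]
        have ihh := ih (lo+1) (by omega) (by omega)
        rw [dropB] at ihh
        refine ⟨by omega, ihh.2.1, ?_⟩
        intro r h1 h2
        by_cases hr : r = lo
        · subst hr; exact hcell
        · exact ihh.2.2 r (by omega) h2

theorem foldl_min_props (cond : Int × Int → Prop) [DecidablePred cond] (v : Int × Int → Int) :
    ∀ (L : List (Int × Int)) (a : Int),
    (L.foldl (fun i p => if cond p then min i (v p) else i) a) ≤ a ∧
    (∀ p ∈ L, cond p → (L.foldl (fun i p => if cond p then min i (v p) else i) a) ≤ v p) ∧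
    ((L.foldl (fun i p => if cond p then min i (v p) else i) a) = a ∨
      ∃ p ∈ L, cond p ∧ (L.foldl (fun i p => if cond p then min i (v p) else i) a) = v p) := by
  intro L
  induction L with
  | nil => intro a; simp
  | cons q rest ih =>
      intro a
      simp only [List.foldl_cons]
      by_cases hq : cond q
      · simp only [if_pos hq]
        obtain ⟨h1, h2, h3⟩ := ih (min a (v q))
        refine ⟨by omega, ?_, ?_⟩
        · intro p hp hc
          rcases List.mem_cons.mp hp with h | h
          · subst h; omega
          · exact h2 p h hc
        · rcases h3 with h | ⟨p, hp, hc, he⟩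
          · rcases (by omega : a ≤ v q ∨ v q < a) with hle | hlt
            · exact Or.inl (by omega)
            · exact Or.inr ⟨q, List.mem_cons_self .., hq, by omega⟩
          · exact Or.inr ⟨p, List.mem_cons_of_mem _ hp, hc, he⟩
      · simp only [if_neg hq]
        obtain ⟨h1, h2, h3⟩ := ih a
        refine ⟨h1, ?_, ?_⟩
        · intro p hp hc
          rcases List.mem_cons.mp hp with h | h
          · subst h; exact absurd hc hq
          · exact h2 p h hc
        · rcases h3 with h | ⟨p, hp, hc, he⟩
          · exact Or.inl h
          · exact Or.inr ⟨p, List.mem_cons_of_mem _ hp, hc, he⟩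

theorem restB_props (field figure : List (List Int)) (j : Int) :
    restB field figure j ≤ (field.length : Int) - 1 ∧
    (∀ p ∈ bCells, gget figure (2 - p.1) p.2 = 1 →
      restB field figure j ≤ dropB field (j + p.2) (max 0 (1 - p.1)) + p.1 - 1) ∧
    (restB field figure j = (field.length : Int) - 1 ∨
      ∃ p ∈ bCells, gget figure (2 - p.1) p.2 = 1 ∧
        restB field figure j = dropB field (j + p.2) (max 0 (1 - p.1)) + p.1 - 1) := by
  unfold restB
  exact foldl_min_props (fun p => gget figure (2 - p.1) p.2 = 1)
    (fun p => dropB field (j + p.2) (max 0 (1 - p.1)) + p.1 - 1) bCells ((field.length : Int) - 1)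

theorem land_eq (field figure : List (List Int)) (j : Int) (hf : field ≠ []) :
    fallAux field figure j field.length 0 = restB field figure j := by
  have hf1 : 1 ≤ (field.length : Int) := by
    have := List.length_pos_iff.mpr hf; omega
  obtain ⟨hub, hbd, hrep⟩ := restB_props field figure j
  have hb_bounds : ∀ p ∈ bCells, (0:Int) ≤ p.1 ∧ p.1 ≤ 2 ∧ 0 ≤ p.2 ∧ p.2 ≤ 2 := by decide
  have hab : ∀ p ∈ aPts, p ∈ bCells := by decide
  have hba : ∀ p ∈ bCells, p ∈ aPts := by decide
  have hr0 : 0 ≤ restB field figure j := by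
    rcases hrep with h | ⟨p, hp, hc, he⟩
    · omega
    · have hx := hb_bounds p hp
      have hlo : max 0 (1 - p.1) ≤ (field.length : Int) := by omega
      obtain ⟨hd1, _, _⟩ := dropB_all field (j + p.2) _ (max 0 (1 - p.1)) rfl hlo
      omega
  apply fallAux_eq_least field figure j field.length 0 (restB field figure j) hr0 (by omega)
  · intro k hk0 hkr
    cases hcf : canFall field figure (k+1) j
    · exfalso
      rcases (canFall_false_iff field figure (k+1) j).mp hcf with h | ⟨p, hp, hocc, hge, hcell⟩
      · omega
      · have hpb : p ∈ bCells := hab p hp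
        have hx := hb_bounds p hpb
        have hlo : max 0 (1 - p.1) ≤ (field.length : Int) := by omega
        obtain ⟨hd1, hd2, hd3⟩ := dropB_all field (j + p.2) _ (max 0 (1 - p.1)) rfl hlo
        have hcol : p.2 + j = j + p.2 := by ring
        rw [hcol] at hcell
        have hdle : dropB field (j + p.2) (max 0 (1 - p.1)) ≤ k + 1 - p.1 := by
          by_contra hlt
          exact hd3 (k + 1 - p.1) (by omega) (by omega) hcell
        have := hbd p hpb hocc
        omega
    · rfl
  · apply (canFall_false_iff field figure (restB field figure j + 1) j).mpr
    rcases hrep with h | ⟨p, hp, hocc, he⟩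
    · left; omega
    · by_cases hrH : restB field figure j + 1 = (field.length : Int)
      · left; exact hrH
      · right
        have hx := hb_bounds p hp
        have hlo : max 0 (1 - p.1) ≤ (field.length : Int) := by omega
        obtain ⟨hd1, hd2, hd3⟩ := dropB_all field (j + p.2) _ (max 0 (1 - p.1)) rfl hlo
        rcases hd2 with hdh | ⟨hdlt, hdcell⟩
        · exfalso; omega
        · refine ⟨p, hba p hp, hocc, by omega, ?_⟩
          have hidx : restB field figure j + 1 - p.1 = dropB field (j + p.2) (max 0 (1 - p.1)) := by omega
          rw [show p.2 + j = j + p.2 from by ring, hidx]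
          exact hdcell

theorem row_eq (field figure : List (List Int)) (r p x : Int) :
    isFilledRow field figure r p x = checkRowB field figure r p x := by
  unfold isFilledRow checkRowB
  refine congrArg _ (funext fun jj => ?_)
  by_cases h1 : gget field r jj = 0 <;> by_cases h2 : jj - p < 0 <;>
    by_cases h3 : 3 ≤ jj - p <;> by_cases h4 : gget figure (2 - x) (jj - p) = 0 <;>
    simp [h1, h2, h3, h4] <;> omega

theorem filled_eq (field figure : List (List Int)) (b j : Int) :
    isFilled field figure b j = checkB field figure b j (PySem.List.pyRange 0 3 1) := by
  have h3 : PySem.List.pyRange 0 3 1 = [0, 1, 2] := by decide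
  rw [isFilled, h3]
  simp only [isFilledAux, checkB, row_eq]

theorem solveAux_eq (field figure : List (List Int)) (hf : field ≠ []) :
    ∀ L : List Int, solveAuxA field figure L = solveAuxB field figure L := by
  intro L
  induction L with
  | nil => rfl
  | cons j rest ih =>
      simp only [solveAuxA, solveAuxB, land_eq field figure j hf, filled_eq]
      split <;> simp [ih]

-- ===== VERDICT (by name: the statement is the Claim_ definition above) =====
theorem solve_spec : Claim_equal_solve := by
  intro field figure _ hpre
  unfold Spec_solve solve solve_alt
  exact solveAux_eq field figure hpre.1 _
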